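-- pv_equiv track=rewrite | github.com/Nick123293/cosc-6339-project | preprocessing.py | detect_direction_columns
-- ===== SOURCE A (Python) =====
-- from typing import Any, Deque, Dict, Iterable, List, Optional, Sequence, Set, Tuple
--
-- def detect_direction_columns(columns: Sequence[str], explicit: Sequence[str], auto_detect: bool = True) -> List[str]:
--     """Find which columns should be expanded into direction sine/cosine features."""
--     detected: List[str] = []
--     seen: Set[str] = set()
--     if auto_detect:
--         for c in columns:
--             cl = c.lower()
--             if "direction" in cl or "wind_dir" in cl or "winddirection" in cl:
--                 if c not in seen:
--                     detected.append(c)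
--                     seen.add(c)
--     for c in explicit:
--         if c in columns and c not in seen:
--             detected.append(c)
--             seen.add(c)
--     return detected
-- ===== SOURCE B (Python) =====
-- def detect_direction_columns(columns, explicit, auto_detect=True):
--     """Find which columns should be expanded into direction sine/cosine features.
--
--     Rank-and-sort: collect the distinct candidates as a set, give each a
--     numeric rank (auto-detected ones rank by first position in `columns`,
--     the remaining explicit ones after them by first position in `explicit`),
--     and sort the set by rank."""
--     keywords = ("direction", "wind_dir", "winddirection")
--
--     def is_auto(c):
--         cl = c.lower()
--         return auto_detect and any(k in cl for k in keywords)
--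
--     cands = {c for c in columns if is_auto(c)}
--     cands |= {c for c in explicit if c in columns}
--
--     def rank(c):
--         if is_auto(c):
--             return columns.index(c)
--         return len(columns) + explicit.index(c)
--
--     return sorted(cands, key=rank)
-- ===== Notes on version B (the rewrite author's own statement) =====
-- stated objective: alternative
-- what changed: Instead of two sequential loops threading a 'seen' set and appending in encounter order, B collects the distinct candidates as a set, assigns each a numeric rank (auto-detected: first position in columns; remaining explicit: len(columns) + first position in explicit) and sorts the set by that rank.
import Mathlib
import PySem

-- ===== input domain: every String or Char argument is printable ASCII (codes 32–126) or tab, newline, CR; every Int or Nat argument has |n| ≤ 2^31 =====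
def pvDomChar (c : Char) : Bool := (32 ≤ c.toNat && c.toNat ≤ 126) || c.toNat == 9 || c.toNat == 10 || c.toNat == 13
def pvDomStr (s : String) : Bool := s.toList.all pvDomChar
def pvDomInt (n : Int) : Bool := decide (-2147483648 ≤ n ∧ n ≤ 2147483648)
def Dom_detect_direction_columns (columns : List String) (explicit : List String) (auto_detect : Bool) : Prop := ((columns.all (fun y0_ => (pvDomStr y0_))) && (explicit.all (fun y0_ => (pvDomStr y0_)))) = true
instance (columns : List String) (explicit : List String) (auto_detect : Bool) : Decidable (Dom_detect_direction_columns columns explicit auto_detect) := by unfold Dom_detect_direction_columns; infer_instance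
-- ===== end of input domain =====

-- B replaces A's two stateful in-order loops by a rank-and-sort algorithm: collect the distinct
-- candidates as a set, rank each numerically, and sort the set by rank (objective: alternative).

-- ===== PORT A =====
-- literal transliteration: two loops appending to `detected` guarded by a `seen` set
def detect_direction_columns (columns : List String) (explicit : List String) (auto_detect : Bool) : List String :=
  let st0 : List String × PySem.Set String := ([], PySem.Set.empty)
  let st1 :=
    if auto_detect then
      columns.foldl (fun (st : List String × PySem.Set String) c =>
        let cl := PySem.Str.lower c
        if PySem.Str.isIn "direction" cl || PySem.Str.isIn "wind_dir" cl || PySem.Str.isIn "winddirection" cl then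
          if st.2.contains c then st else (st.1 ++ [c], st.2.add c)
        else st) st0
    else st0
  let st2 := explicit.foldl (fun (st : List String × PySem.Set String) c =>
      if columns.contains c && !(st.2.contains c) then (st.1 ++ [c], st.2.add c) else st) st1
  st2.1

-- ===== PORT B =====
-- B's helper is_auto(c): auto_detect and any(k in c.lower() for k in keywords)
def pvKw (c : String) : Bool :=
  (["direction", "wind_dir", "winddirection"] : List String).any
    (fun k => PySem.Str.isIn k (PySem.Str.lower c))

def pvIsAuto (auto_detect : Bool) (c : String) : Bool := auto_detect && pvKw c

-- B's rank(c); `.index` cannot raise where B applies it (every ranked candidate is a member),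
-- so the `.getD 0` default is unreachable there
def pvRank (columns : List String) (explicit : List String) (auto_detect : Bool) (c : String) : Int :=
  if pvIsAuto auto_detect c then ((PySem.List.index? columns c).getD 0 : Nat)
  else (columns.length : Int) + ((PySem.List.index? explicit c).getD 0 : Nat)

def detect_direction_columns_alt (columns : List String) (explicit : List String) (auto_detect : Bool) : List String :=
  let cands : PySem.Set String := PySem.Set.ofList (columns.filter (fun c => pvIsAuto auto_detect c))
  let cands := PySem.Set.union cands (explicit.filter (fun c => columns.contains c))
  PySem.List.sorted cands (pvRank columns explicit auto_detect) false

-- ===== PRECONDITION & SPEC =====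
def Spec_detect_direction_columns (columns : List String) (explicit : List String) (auto_detect : Bool) (out : List String) : Prop := out = detect_direction_columns_alt columns explicit auto_detect
instance (columns : List String) (explicit : List String) (auto_detect : Bool) (out : List String) : Decidable (Spec_detect_direction_columns columns explicit auto_detect out) := by unfold Spec_detect_direction_columns; infer_instance

-- ===== CLAIM =====
def Claim_equal_detect_direction_columns : Prop := ∀ (columns : List String) (explicit : List String) (auto_detect : Bool), Dom_detect_direction_columns columns explicit auto_detect → Spec_detect_direction_columns columns explicit auto_detect (detect_direction_columns columns explicit auto_detect)

-- ===== LEMMAS AND PROOFS =====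

-- first index of a member (the `.getD 0` is the same totalisation pvRank uses)
def pvIdx (l : List String) (c : String) : Nat := (PySem.List.index? l c).getD 0

theorem pv_idx_cons_self (x : String) (t : List String) : pvIdx (x :: t) x = 0 := by
  unfold pvIdx; rw [PySem.List.index?_cons_self]; rfl

theorem pv_idx_cons_ne {x a : String} (t : List String) (h : x ≠ a) (ha : a ∈ t) :
    pvIdx (x :: t) a = pvIdx t a + 1 := by
  obtain ⟨k, hk⟩ := Option.isSome_iff_exists.mp ((PySem.List.index?_isSome_iff t a).mpr ha)
  unfold pvIdx; rw [PySem.List.index?_cons_of_ne t h, hk]; rfl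

theorem pv_idx_lt_length {a : String} {l : List String} (ha : a ∈ l) : pvIdx l a < l.length := by
  induction l with
  | nil => cases ha
  | cons x t ih =>
    by_cases hx : x = a
    · subst hx; simp [pv_idx_cons_self]
    · have hat : a ∈ t := by cases ha with | head => exact absurd rfl hx | tail _ h => exact h
      rw [pv_idx_cons_ne t hx hat]; simpa using Nat.succ_lt_succ (ih hat)

theorem pv_idx_append_left {a : String} (l t : List String) (ha : a ∈ l) :
    pvIdx (l ++ t) a = pvIdx l a := by
  unfold pvIdx; rw [PySem.List.index?_append_of_mem t ha]

theorem pv_idx_append_right {a : String} (l t : List String) (hnl : a ∉ l) (ha : a ∈ t) :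
    pvIdx (l ++ t) a = l.length + pvIdx t a := by
  induction l with
  | nil => simp
  | cons x l' ih =>
    have hx : x ≠ a := fun h => hnl (h ▸ List.mem_cons_self)
    have hnl' : a ∉ l' := fun h => hnl (List.mem_cons_of_mem _ h)
    have hmem : a ∈ l' ++ t := List.mem_append_right _ ha
    rw [List.cons_append, pv_idx_cons_ne (l' ++ t) hx hmem, ih hnl']
    simp; omega

theorem pv_idx_filter_mono {a b : String} (p : String → Bool) (l : List String)
    (ha : a ∈ l.filter p) (hb : b ∈ l.filter p)
    (h : pvIdx (l.filter p) a < pvIdx (l.filter p) b) : pvIdx l a < pvIdx l b := by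
  induction l with
  | nil => simp at ha
  | cons x t ih =>
    by_cases hp : p x = true
    · rw [List.filter_cons_of_pos hp] at ha hb h
      by_cases hxa : x = a
      · subst hxa
        rw [pv_idx_cons_self] at h ⊢
        have hxb : x ≠ b := by rintro rfl; simp [pv_idx_cons_self] at h
        have hbt : b ∈ t.filter p := by
          cases hb with | head => exact absurd rfl hxb | tail _ h' => exact h'
        have : b ∈ t := (List.mem_filter.mp hbt).1
        rw [pv_idx_cons_ne t hxb this]; omega
      · have hat : a ∈ t.filter p := by
          cases ha with | head => exact absurd rfl hxa | tail _ h' => exact h'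
        have hxb : x ≠ b := by
          rintro rfl
          rw [pv_idx_cons_self] at h
          rw [pv_idx_cons_ne (t.filter p) hxa hat] at h; omega
        have hbt : b ∈ t.filter p := by
          cases hb with | head => exact absurd rfl hxb | tail _ h' => exact h'
        rw [pv_idx_cons_ne (t.filter p) hxa hat, pv_idx_cons_ne (t.filter p) hxb hbt] at h
        rw [pv_idx_cons_ne t hxa (List.mem_filter.mp hat).1,
            pv_idx_cons_ne t hxb (List.mem_filter.mp hbt).1]
        exact Nat.succ_lt_succ (ih hat hbt (by omega))
    · rw [List.filter_cons_of_neg hp] at ha hb h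
      have hxa : x ≠ a := by rintro rfl; exact hp (List.mem_filter.mp ha).2
      have hxb : x ≠ b := by rintro rfl; exact hp (List.mem_filter.mp hb).2
      rw [pv_idx_cons_ne t hxa (List.mem_filter.mp ha).1,
          pv_idx_cons_ne t hxb (List.mem_filter.mp hb).1]
      exact Nat.succ_lt_succ (ih ha hb h)

-- closed form of the Set-building fold: existing elements kept, new distinct ones appended in order
theorem pv_foldl_add (t : List String) (s : PySem.Set String) :
    t.foldl PySem.Set.add s = s ++ (PySem.Set.ofList t).filter (fun z => !(s.contains z)) := by
  induction t generalizing s with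
  | nil => simp [PySem.Set.ofList]
  | cons y t' ih =>
    have hof : PySem.Set.ofList (y :: t')
        = [y] ++ (PySem.Set.ofList t').filter (fun z => !(([y] : List String).contains z)) := by
      rw [PySem.Set.ofList_eq_foldl, List.foldl_cons]
      exact ih [y]
    rw [List.foldl_cons, hof, List.filter_append, List.filter_filter]
    by_cases hy : y ∈ s
    · have hyc : s.contains y = true := by simpa using hy
      have hadd : PySem.Set.add s y = s := by unfold PySem.Set.add; rw [if_pos hyc]
      rw [hadd, ih s]
      have hfy : ([y] : List String).filter (fun z => !(s.contains z)) = [] := by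
        simp [List.filter, hy]
      rw [hfy, List.nil_append]
      congr 1
      apply List.filter_congr
      intro z _
      by_cases hz : z ∈ s
      · simp [hz]
      · have hzy : z ≠ y := fun h => hz (h ▸ hy)
        simp [hz, hzy]
    · have hyc : ¬ s.contains y = true := by simpa using hy
      have hadd : PySem.Set.add s y = s ++ [y] := by unfold PySem.Set.add; rw [if_neg hyc]
      rw [hadd, ih (s ++ [y])]
      have hfy : ([y] : List String).filter (fun z => !(s.contains z)) = [y] := by
        simp [List.filter, hy]
      rw [hfy, List.append_assoc]
      congr 2
      apply List.filter_congr
      intro z _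
      by_cases hzy : z = y
      · subst hzy; simp
      · by_cases hz : z ∈ s
        · simp [hz, hzy]
        · simp [hz, hzy]

theorem pv_dedup_cons (x : String) (t : List String) :
    PySem.List.dedup (x :: t) = x :: (PySem.List.dedup t).filter (fun z => !(decide (z = x))) := by
  rw [PySem.List.dedup_eq_ofList, PySem.List.dedup_eq_ofList, PySem.Set.ofList_eq_foldl,
      List.foldl_cons, show PySem.Set.add ([] : PySem.Set String) x = [x] from rfl,
      pv_foldl_add t [x]]
  rw [PySem.Set.ofList_eq_foldl]
  simp only [List.cons_append, List.nil_append, List.cons.injEq, true_and]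
  apply List.filter_congr
  intro z _
  by_cases h : z = x <;> simp [h]

theorem pv_dedup_pairwise (w : List String) :
    (PySem.List.dedup w).Pairwise (fun a b => pvIdx w a < pvIdx w b) := by
  induction w with
  | nil => simp [PySem.List.dedup_eq_ofList, PySem.Set.ofList]
  | cons x t ih =>
    rw [pv_dedup_cons]
    constructor
    · intro b hb
      have hbx' : x ≠ b := by
        have := (List.mem_filter.mp hb).2; simp at this; exact fun h => this h.symm
      have hbt : b ∈ t := (PySem.List.mem_dedup _ _).mp (List.mem_filter.mp hb).1
      rw [pv_idx_cons_self, pv_idx_cons_ne t hbx' hbt]; omega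
    · have hpw : ((PySem.List.dedup t).filter (fun z => !(decide (z = x)))).Pairwise
          (fun a b => pvIdx t a < pvIdx t b) := ih.filter _
      refine hpw.imp_of_mem ?_
      intro a b ha hb hlt
      have hax : x ≠ a := by
        have := (List.mem_filter.mp ha).2; simp at this; exact fun h => this h.symm
      have hbx : x ≠ b := by
        have := (List.mem_filter.mp hb).2; simp at this; exact fun h => this h.symm
      have hat : a ∈ t := (PySem.List.mem_dedup _ _).mp (List.mem_filter.mp ha).1
      have hbt : b ∈ t := (PySem.List.mem_dedup _ _).mp (List.mem_filter.mp hb).1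
      rw [pv_idx_cons_ne t hax hat, pv_idx_cons_ne t hbx hbt]; omega

-- the candidate set ordered by pvRank is strictly increasing exactly in the dedup order
theorem pv_rank_pairwise (columns explicit : List String) (ad : Bool) :
    (PySem.List.dedup (columns.filter (fun c => pvIsAuto ad c)
        ++ explicit.filter (fun c => columns.contains c))).Pairwise
      (fun a b => pvRank columns explicit ad a < pvRank columns explicit ad b) := by
  have hP := pv_dedup_pairwise (columns.filter (fun c => pvIsAuto ad c)
      ++ explicit.filter (fun c => columns.contains c))
  refine hP.imp_of_mem ?_
  intro a b ha hb hlt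
  have haw := (PySem.List.mem_dedup _ _).mp ha
  have hbw := (PySem.List.mem_dedup _ _).mp hb
  have hcol : ∀ c, c ∈ columns.filter (fun c => pvIsAuto ad c)
      ++ explicit.filter (fun c => columns.contains c) → c ∈ columns := by
    intro c hc
    rcases List.mem_append.mp hc with h | h
    · exact (List.mem_filter.mp h).1
    · have := (List.mem_filter.mp h).2; simpa using this
  have hmemA : ∀ c, c ∈ columns.filter (fun c => pvIsAuto ad c)
      ++ explicit.filter (fun c => columns.contains c) → pvIsAuto ad c = true →
      c ∈ columns.filter (fun c => pvIsAuto ad c) := by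
    intro c hc hA
    exact List.mem_filter.mpr ⟨hcol c hc, hA⟩
  have hmemE : ∀ c, c ∈ columns.filter (fun c => pvIsAuto ad c)
      ++ explicit.filter (fun c => columns.contains c) → pvIsAuto ad c = false →
      c ∉ columns.filter (fun c => pvIsAuto ad c)
        ∧ c ∈ explicit.filter (fun c => columns.contains c) := by
    intro c hc hA
    have hna : c ∉ columns.filter (fun c => pvIsAuto ad c) := fun h => by
      have := (List.mem_filter.mp h).2; rw [hA] at this; cases this
    refine ⟨hna, ?_⟩
    rcases List.mem_append.mp hc with h | h
    · exact absurd h hna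
    · exact h
  by_cases hA : pvIsAuto ad a = true <;> by_cases hB : pvIsAuto ad b = true
  · -- both auto-detected: compare first positions in columns
    have haa := hmemA a haw hA
    have hba := hmemA b hbw hB
    rw [pv_idx_append_left _ _ haa, pv_idx_append_left _ _ hba] at hlt
    have := pv_idx_filter_mono _ columns haa hba hlt
    simp only [pvRank, hA, hB, if_pos]
    unfold pvIdx at this
    exact_mod_cast this
  · -- a auto-detected, b explicit-only: rank a < |columns| ≤ rank b
    have hlen := pv_idx_lt_length (hcol a haw)
    simp only [pvRank, hA, hB, if_pos, Bool.false_eq_true, if_false]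
    unfold pvIdx at hlen
    have h0 : (0 : Int) ≤ ((PySem.List.index? explicit b).getD 0 : Nat) := by positivity
    have hcast : (((PySem.List.index? columns a).getD 0 : Nat) : Int) < (columns.length : Int) := by
      exact_mod_cast hlen
    omega
  · -- impossible: b's first occurrence is inside auto, a's strictly after it
    exfalso
    have hba := hmemA b hbw hB
    obtain ⟨hna, hae⟩ := hmemE a haw (by simpa using hA)
    rw [pv_idx_append_left _ _ hba, pv_idx_append_right _ _ hna hae] at hlt
    have := pv_idx_lt_length hba
    omega
  · -- both explicit-only: compare first positions in explicit
    obtain ⟨hna, hae⟩ := hmemE a haw (by simpa using hA)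
    obtain ⟨hnb, hbe⟩ := hmemE b hbw (by simpa using hB)
    rw [pv_idx_append_right _ _ hna hae, pv_idx_append_right _ _ hnb hbe] at hlt
    have := pv_idx_filter_mono _ explicit hae hbe (by omega)
    simp only [pvRank, hA, hB, Bool.false_eq_true, if_false]
    unfold pvIdx at this
    have hcast : (((PySem.List.index? explicit a).getD 0 : Nat) : Int)
        < ((PySem.List.index? explicit b).getD 0 : Nat) := by exact_mod_cast this
    omega

-- the keyword test written in A equals B's pvKw
theorem pv_kw_eq (c : String) :
    (PySem.Str.isIn "direction" (PySem.Str.lower c) || PySem.Str.isIn "wind_dir" (PySem.Str.lower c)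
      || PySem.Str.isIn "winddirection" (PySem.Str.lower c)) = pvKw c := by
  simp [pvKw, Bool.or_assoc]

-- A's first loop, started with both state components equal, computes the Set-fold of the filtered columns, twice.
theorem pv_fold1 (l : List String) (d : PySem.Set String) :
    l.foldl (fun (st : List String × PySem.Set String) c =>
        let cl := PySem.Str.lower c
        if PySem.Str.isIn "direction" cl || PySem.Str.isIn "wind_dir" cl || PySem.Str.isIn "winddirection" cl then
          if st.2.contains c then st else (st.1 ++ [c], st.2.add c)
        else st) (d, d)
      = ((l.filter pvKw).foldl PySem.Set.add d, (l.filter pvKw).foldl PySem.Set.add d) := by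
  induction l generalizing d with
  | nil => rfl
  | cons c t ih =>
    simp only [pv_kw_eq] at ih ⊢
    rw [List.foldl_cons, List.filter_cons]
    by_cases hp : pvKw c = true
    · by_cases hc : PySem.Set.contains d c = true
      · have hadd : PySem.Set.add d c = d := by unfold PySem.Set.add; rw [if_pos hc]
        simp only [hp, hc, List.foldl_cons, hadd, ih, reduceIte]
      · have hadd : PySem.Set.add d c = d ++ [c] := by unfold PySem.Set.add; rw [if_neg hc]
        simp only [hp, hc, Bool.false_eq_true, if_false, List.foldl_cons, reduceIte]
        rw [← hadd, ih]
    · simp only [hp, Bool.false_eq_true, if_false, ih]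

-- A's second loop, started with both state components equal, computes the Set-fold of explicit filtered by membership.
theorem pv_fold2 (columns : List String) (l : List String) (d : PySem.Set String) :
    l.foldl (fun (st : List String × PySem.Set String) c =>
        if columns.contains c && !(st.2.contains c) then (st.1 ++ [c], st.2.add c) else st) (d, d)
      = ((l.filter (fun c => columns.contains c)).foldl PySem.Set.add d,
         (l.filter (fun c => columns.contains c)).foldl PySem.Set.add d) := by
  induction l generalizing d with
  | nil => rfl
  | cons c t ih =>
    rw [List.foldl_cons, List.filter_cons]
    by_cases hm : columns.contains c = true
    · by_cases hc : PySem.Set.contains d c = true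
      · have hadd : PySem.Set.add d c = d := by unfold PySem.Set.add; rw [if_pos hc]
        simp only [hm, hc, Bool.not_true, Bool.and_false, Bool.false_eq_true, if_false,
          List.foldl_cons, hadd, ih, reduceIte]
      · have hadd : PySem.Set.add d c = d ++ [c] := by unfold PySem.Set.add; rw [if_neg hc]
        simp only [hm, hc, Bool.not_false, Bool.and_true, List.foldl_cons, reduceIte]
        rw [← hadd, ih]
    · simp only [hm, Bool.false_and, Bool.false_eq_true, if_false, ih]

-- A's result is exactly dedup(auto ++ extra)
theorem pv_A_eq_dedup (columns explicit : List String) (ad : Bool) :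
    detect_direction_columns columns explicit ad
      = PySem.List.dedup (columns.filter (fun c => pvIsAuto ad c)
          ++ explicit.filter (fun c => columns.contains c)) := by
  have hfa : columns.filter (fun c => pvIsAuto ad c)
      = if ad then columns.filter pvKw else [] := by
    cases ad with
    | true => simp [pvIsAuto]
    | false => simp [pvIsAuto]
  unfold detect_direction_columns
  cases ad with
  | false =>
    simp only [Bool.false_eq_true, if_false] at hfa ⊢
    rw [show (([], PySem.Set.empty) : List String × PySem.Set String)
          = ((PySem.Set.empty : PySem.Set String), (PySem.Set.empty : PySem.Set String)) from rfl,
        pv_fold2 columns explicit PySem.Set.empty]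
    rw [hfa]
    simp [PySem.List.dedup_eq_ofList, PySem.Set.ofList_eq_foldl, PySem.Set.empty]
  | true =>
    simp only [reduceIte] at hfa ⊢
    rw [show (([], PySem.Set.empty) : List String × PySem.Set String)
          = ((PySem.Set.empty : PySem.Set String), (PySem.Set.empty : PySem.Set String)) from rfl,
        pv_fold1 columns PySem.Set.empty, pv_fold2 columns explicit]
    rw [hfa]
    simp [PySem.List.dedup_eq_ofList, PySem.Set.ofList_eq_foldl, List.foldl_append,
      PySem.Set.empty]

-- B's candidate set is that same dedup list
theorem pv_cands_eq_dedup (columns explicit : List String) (ad : Bool) :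
    PySem.Set.union (PySem.Set.ofList (columns.filter (fun c => pvIsAuto ad c)))
        (explicit.filter (fun c => columns.contains c))
      = PySem.List.dedup (columns.filter (fun c => pvIsAuto ad c)
          ++ explicit.filter (fun c => columns.contains c)) := by
  rw [PySem.List.dedup_eq_ofList, PySem.Set.ofList_eq_foldl, PySem.Set.ofList_eq_foldl,
      List.foldl_append]
  rfl

-- ===== VERDICT (by name: the statement is the Claim_ definition above) =====
theorem detect_direction_columns_spec : Claim_equal_detect_direction_columns := by
  intro columns explicit ad _
  unfold Spec_detect_direction_columns
  show detect_direction_columns columns explicit ad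
    = PySem.List.sorted
        (PySem.Set.union (PySem.Set.ofList (columns.filter (fun c => pvIsAuto ad c)))
          (explicit.filter (fun c => columns.contains c)))
        (pvRank columns explicit ad) false
  rw [pv_cands_eq_dedup, pv_A_eq_dedup]
  exact (PySem.List.sorted_eq_of_perm_of_pairwise_lt _ _ (pvRank columns explicit ad)
    (List.Perm.refl _) (pv_rank_pairwise columns explicit ad)).symm
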